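-- pv_equiv track=rewrite | github.com/itswcg/LintCode | checkSumOfSquareNumbers.py | checkSumOfSquareNumbers
-- ===== SOURCE A (Python) =====
-- def checkSumOfSquareNumbers(num):
--     l = []
--     a = 0
--     for i in range(num + 1):
--         a += i * i
--         l.append(a)
--     if num < 0:
--         return False
--     if num in l:
--         return True
-- ===== SOURCE B (Python) =====
-- def checkSumOfSquareNumbers(num):
--     if num < 0:
--         return False
--     lo, hi = 0, num
--     while lo <= hi:
--         mid = (lo + hi) // 2
--         p = mid * (mid + 1) * (2 * mid + 1) // 6
--         if p == num:
--             return True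
--         if p < num:
--             lo = mid + 1
--         else:
--             hi = mid - 1
-- ===== Notes on version B (the rewrite author's own statement) =====
-- stated objective: faster
-- what changed: Replaces A's construction of the full list of running square-sums followed by a linear membership scan with an integer binary search over the candidate range for an index whose square-pyramidal value equals num.
import Mathlib
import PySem

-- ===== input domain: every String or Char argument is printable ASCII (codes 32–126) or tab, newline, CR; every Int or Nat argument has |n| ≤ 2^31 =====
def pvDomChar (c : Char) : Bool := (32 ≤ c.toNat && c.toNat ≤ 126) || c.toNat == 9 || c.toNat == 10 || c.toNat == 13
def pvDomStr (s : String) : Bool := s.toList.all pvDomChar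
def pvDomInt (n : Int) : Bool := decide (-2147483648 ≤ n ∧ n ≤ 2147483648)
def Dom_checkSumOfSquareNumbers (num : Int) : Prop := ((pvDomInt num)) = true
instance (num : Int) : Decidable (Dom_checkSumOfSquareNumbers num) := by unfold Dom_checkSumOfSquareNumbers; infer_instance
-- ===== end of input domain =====

-- B replaces A's O(n) cumulative-sum list scan by an integer binary search for k with
-- k(k+1)(2k+1)//6 == num over [0, num]; equivalence of the RETURN value is proved (A mutates nothing).

-- ===== PORT A =====
-- literal port of A: build the list of running sums a += i*i over range(num+1), then the two ifs.
-- Python's O(1) l.append is ported as a cons-accumulator, reversed after the loop (same list l).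
def checkSumOfSquareNumbers (num : Int) : Option Bool :=
  let st := (PySem.List.pyRange 0 (num + 1) 1).foldl
      (fun (st : Int × List Int) (i : Int) => (st.1 + i * i, (st.1 + i * i) :: st.2))
      (0, [])
  let l := st.2.reverse
  if num < 0 then some false
  else if num ∈ l then some true
  else none

-- ===== PORT B =====
-- the while-loop of Source B, as recursion on the shrinking interval [lo, hi]
def pvBsearch (num lo hi : Int) : Option Bool :=
  if h : lo ≤ hi then
    let mid := PySem.Int.floordiv (lo + hi) 2
    let p := PySem.Int.floordiv (mid * (mid + 1) * (2 * mid + 1)) 6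
    if p = num then some true
    else if p < num then pvBsearch num (mid + 1) hi
    else pvBsearch num lo (mid - 1)
  else none
termination_by (hi - lo + 1).toNat
decreasing_by
  · have := PySem.Int.floordiv_two_mid_bounds h; omega
  · have := PySem.Int.floordiv_two_mid_bounds h; omega

def checkSumOfSquareNumbers_alt (num : Int) : Option Bool :=
  if num < 0 then some false
  else pvBsearch num 0 num

-- ===== PRECONDITION & SPEC =====
def Spec_checkSumOfSquareNumbers (num : Int) (out : Option Bool) : Prop := out = checkSumOfSquareNumbers_alt num
instance (num : Int) (out : Option Bool) : Decidable (Spec_checkSumOfSquareNumbers num out) := by unfold Spec_checkSumOfSquareNumbers; infer_instance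

-- ===== CLAIM (what is proved, stated in full; the proofs are below) =====
def Claim_equal_checkSumOfSquareNumbers : Prop := ∀ (num : Int), Dom_checkSumOfSquareNumbers num → Spec_checkSumOfSquareNumbers num (checkSumOfSquareNumbers num)

-- ===== LEMMAS AND PROOFS =====

-- running sum of squares: sqSum n = 0² + 1² + … + (n-1)²
def sqSum : Nat → Int
  | 0 => 0
  | m + 1 => sqSum m + (m : Int) * (m : Int)

-- the pyramidal value B's search probes at k
def pvP (k : Int) : Int := PySem.Int.floordiv (k * (k + 1) * (2 * k + 1)) 6

lemma six_mul_sqSum (m : Nat) : 6 * sqSum (m + 1) = (m : Int) * (m + 1) * (2 * m + 1) := by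
  induction m with
  | zero => simp [sqSum]
  | succ n ih =>
    have : sqSum (n + 1 + 1) = sqSum (n + 1) + ((n + 1 : Nat) : Int) * ((n + 1 : Nat) : Int) := rfl
    rw [this]; push_cast at ih ⊢; ring_nf at ih ⊢; linarith

lemma pvP_natCast (m : Nat) : pvP (m : Int) = sqSum (m + 1) := by
  unfold pvP
  rw [PySem.Int.floordiv_eq_ediv_of_pos (by norm_num)]
  rw [← six_mul_sqSum m]
  exact Int.mul_ediv_cancel_left _ (by norm_num)

lemma pvP_mono {a b : Int} (ha : 0 ≤ a) (hab : a ≤ b) : pvP a ≤ pvP b := by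
  unfold pvP
  rw [PySem.Int.floordiv_eq_ediv_of_pos (by norm_num),
      PySem.Int.floordiv_eq_ediv_of_pos (by norm_num)]
  apply Int.ediv_le_ediv (by norm_num)
  have hb : 0 ≤ b := le_trans ha hab
  nlinarith [mul_nonneg ha hb, mul_nonneg hb hb, sq_nonneg (b - a), sq_nonneg (b + a)]

-- B's search never returns some false
lemma pvBsearch_ne_false (num lo hi : Int) : pvBsearch num lo hi ≠ some false := by
  fun_induction pvBsearch num lo hi <;> simp_all

-- B's search finds exactly the pyramidal hits inside [lo, hi] (for a nonnegative interval)
lemma pvBsearch_true_iff (n : Nat) :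
    ∀ num lo hi : Int, (hi - lo + 1).toNat ≤ n → 0 ≤ lo →
      (pvBsearch num lo hi = some true ↔ ∃ k : Int, lo ≤ k ∧ k ≤ hi ∧ pvP k = num) := by
  induction n with
  | zero =>
    intro num lo hi hn hlo
    have hba : hi < lo := by omega
    rw [pvBsearch]
    rw [dif_neg (by omega)]
    constructor
    · intro h; cases h
    · rintro ⟨k, h1, h2, _⟩; omega
  | succ n ih =>
    intro num lo hi hn hlo
    rw [pvBsearch]
    by_cases h : lo ≤ hi
    · rw [dif_pos h]
      have hmid := PySem.Int.floordiv_two_mid_bounds h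
      set mid := PySem.Int.floordiv (lo + hi) 2 with hmiddef
      simp only
      by_cases hp : pvP mid = num
      · rw [if_pos (by exact hp)]
        constructor
        · intro _; exact ⟨mid, hmid.1, hmid.2, hp⟩
        · intro _; rfl
      · rw [if_neg (by exact hp)]
        by_cases hlt : pvP mid < num
        · rw [if_pos (by exact hlt)]
          rw [ih num (mid + 1) hi (by omega) (by omega)]
          constructor
          · rintro ⟨k, h1, h2, h3⟩; exact ⟨k, by omega, h2, h3⟩
          · rintro ⟨k, h1, h2, h3⟩
            refine ⟨k, ?_, h2, h3⟩
            by_contra hk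
            have hkmid : k ≤ mid := by omega
            have := pvP_mono (a := k) (b := mid) (by omega) hkmid
            omega
        · rw [if_neg (by exact hlt)]
          rw [ih num lo (mid - 1) (by omega) hlo]
          constructor
          · rintro ⟨k, h1, h2, h3⟩; exact ⟨k, h1, by omega, h3⟩
          · rintro ⟨k, h1, h2, h3⟩
            refine ⟨k, h1, ?_, h3⟩
            by_contra hk
            have := pvP_mono (a := mid) (b := k) (by omega) (by omega)
            omega
    · rw [dif_neg h]
      constructor
      · intro hc; cases hc
      · rintro ⟨k, h1, h2, _⟩; omega

-- A's loop builds the list of partial sums sqSum (k+1), k = 0 … n-1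
lemma foldA (n : Nat) :
    ((List.range n).map (fun (k : Nat) => (k : Int))).foldl
      (fun (st : Int × List Int) (i : Int) => (st.1 + i * i, (st.1 + i * i) :: st.2))
      (0, [])
    = (sqSum n, ((List.range n).map (fun k => sqSum (k + 1))).reverse) := by
  induction n with
  | zero => rfl
  | succ m ih =>
    rw [List.range_succ, List.map_append, List.foldl_append, ih, List.map_append,
      List.reverse_append]
    have hs : sqSum (m + 1) = sqSum m + (m : Int) * (m : Int) := rfl
    simp only [List.map_cons, List.map_nil, List.foldl_cons, List.foldl_nil, hs,
      List.reverse_cons, List.reverse_nil, List.nil_append, List.singleton_append]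

lemma A_eval (num : Int) (hnum : 0 ≤ num) :
    checkSumOfSquareNumbers num =
      if num ∈ (List.range (num.toNat + 1)).map (fun k => sqSum (k + 1)) then some true
      else none := by
  unfold checkSumOfSquareNumbers
  have hr : PySem.List.pyRange 0 (num + 1) 1
      = (List.range (num.toNat + 1)).map (fun (k : Nat) => (k : Int)) := by
    rw [PySem.List.pyRange_one]
    have : (num + 1 - 0).toNat = num.toNat + 1 := by omega
    rw [this]
    refine List.map_congr_left ?_
    intro k _
    omega
  rw [hr, foldA]
  simp only [List.reverse_reverse]
  rw [if_neg (by omega)]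

-- ===== VERDICT (by name: the statement is the Claim_ definition above) =====
theorem checkSumOfSquareNumbers_spec : Claim_equal_checkSumOfSquareNumbers := by
  intro num _
  unfold Spec_checkSumOfSquareNumbers checkSumOfSquareNumbers_alt
  by_cases hneg : num < 0
  · rw [if_pos hneg]
    unfold checkSumOfSquareNumbers
    rw [if_pos hneg]
  · rw [if_neg hneg]
    have hnum : 0 ≤ num := by omega
    rw [A_eval num hnum]
    have htrue := pvBsearch_true_iff (num - 0 + 1).toNat num 0 num (le_refl _) (le_refl _)
    by_cases hmem : num ∈ (List.range (num.toNat + 1)).map (fun k => sqSum (k + 1))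
    · rw [if_pos hmem]
      obtain ⟨k, hk, hval⟩ := List.mem_map.mp hmem
      have hkr : k < num.toNat + 1 := List.mem_range.mp hk
      refine (htrue.mpr ⟨(k : Int), by omega, by omega, ?_⟩).symm
      rw [pvP_natCast]; exact hval
    · rw [if_neg hmem]
      cases hres : pvBsearch num 0 num with
      | none => rfl
      | some b =>
        cases b with
        | false => exact absurd hres (pvBsearch_ne_false num 0 num)
        | true =>
          obtain ⟨k, h0, hkn, hP⟩ := htrue.mp hres
          exfalso
          apply hmem
          refine List.mem_map.mpr ⟨k.toNat, List.mem_range.mpr (by omega), ?_⟩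
          rw [← pvP_natCast]
          have : ((k.toNat : Int)) = k := by omega
          rw [this]; exact hP
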